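-- pv_equiv track=rewrite | github.com/LiamJGahan/Fido-Fetch-AI | helpers.py | scrub_tool_values
-- ===== SOURCE A (Python) =====
-- def scrub_tool_values(text):
--     keywords = ["household_id", "household", "item_id", "item", "id"]
--     words = text.split()
--     result = []
--
--     i = 0
--     while i < len(words):
--         word = words[i].lower()
--
--         # Match
--         if word in keywords:
--             result.append(f"{word}: ___")
--             i += 1
--             # Skip next word if it's a number
--             if i < len(words) and words[i].isdigit():
--                 i += 1
--         elif words[i].isdigit():
--             result.append("___")
--             i += 1
--         else:
--             result.append(words[i])
--             i += 1
--
--     return " ".join(result)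
-- ===== SOURCE B (Python) =====
-- def scrub_tool_values(text):
--     keywords = {"household_id", "household", "item_id", "item", "id"}
--     out = []
--     after_keyword = False
--     for w in text.split():
--         lw = w.lower()
--         if lw in keywords:
--             out.append(f"{lw}: ___")
--             after_keyword = True
--         elif w.isdigit():
--             if not after_keyword:
--                 out.append("___")
--             after_keyword = False
--         else:
--             out.append(w)
--             after_keyword = False
--     return " ".join(out)
-- ===== Notes on version B (the rewrite author's own statement) =====
-- stated objective: simpler
-- what changed: Replaced the index-driven while loop with manual lookahead/skip (i += 2 after a keyword followed by a digit) by a single for-loop state machine over the words carrying a boolean look-behind flag that decides whether a digit is dropped.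
import Mathlib
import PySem

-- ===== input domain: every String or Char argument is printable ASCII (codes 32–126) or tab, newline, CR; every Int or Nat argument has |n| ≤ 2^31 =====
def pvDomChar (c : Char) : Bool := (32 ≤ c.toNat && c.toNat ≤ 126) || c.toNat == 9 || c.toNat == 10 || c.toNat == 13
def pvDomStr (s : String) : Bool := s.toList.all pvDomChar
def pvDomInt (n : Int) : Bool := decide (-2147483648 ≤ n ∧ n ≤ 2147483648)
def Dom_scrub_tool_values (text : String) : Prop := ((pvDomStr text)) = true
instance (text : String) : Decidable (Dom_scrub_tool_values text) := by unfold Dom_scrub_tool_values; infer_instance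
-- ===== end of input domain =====

-- B replaces A's index-driven while loop with manual digit-skip (i += 2) by a one-pass
-- state machine carrying an 'after_keyword' flag (objective: simpler).

-- ===== PORT A =====
def pvKeywordsA : List String := ["household_id", "household", "item_id", "item", "id"]

-- the while loop of A: index i into words, building the result list front-to-back
def pvLoopA (words : List String) (i : Nat) : List String :=
  if h : i < words.length then
    let word := PySem.Str.lower words[i]
    if pvKeywordsA.contains word then
      -- append f"{word}: ___", i += 1, then skip next word if it's a number
      if h2 : i + 1 < words.length then
        if PySem.Str.strIsdigit words[i+1] then
          (word ++ ": ___") :: pvLoopA words (i + 2)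
        else
          (word ++ ": ___") :: pvLoopA words (i + 1)
      else
        (word ++ ": ___") :: pvLoopA words (i + 1)
    else if PySem.Str.strIsdigit words[i] then
      "___" :: pvLoopA words (i + 1)
    else
      words[i] :: pvLoopA words (i + 1)
  else []
termination_by words.length - i

def scrub_tool_values (text : String) : String :=
  PySem.Str.join " " (pvLoopA (PySem.Str.split₀ text) 0)

-- ===== PORT B =====
def pvKeywordsB : PySem.Set String := PySem.Set.ofList ["household_id", "household", "item_id", "item", "id"]

-- one iteration of B's for loop: state = (after_keyword flag, out list)
def pvStepB (st : Bool × List String) (w : String) : Bool × List String :=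
  let lw := PySem.Str.lower w
  if pvKeywordsB.contains lw then
    (true, st.2 ++ [lw ++ ": ___"])
  else if PySem.Str.strIsdigit w then
    (false, if st.1 then st.2 else st.2 ++ ["___"])
  else
    (false, st.2 ++ [w])

def scrub_tool_values_alt (text : String) : String :=
  PySem.Str.join " " ((PySem.Str.split₀ text).foldl pvStepB (false, [])).2

-- ===== PRECONDITION & SPEC =====
def Spec_scrub_tool_values (text : String) (out : String) : Prop := out = scrub_tool_values_alt text
instance (text : String) (out : String) : Decidable (Spec_scrub_tool_values text out) := by unfold Spec_scrub_tool_values; infer_instance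

-- ===== CLAIM (what is proved, stated in full; the proofs are below) =====
def Claim_equal_scrub_tool_values : Prop := ∀ (text : String), Dom_scrub_tool_values text → Spec_scrub_tool_values text (scrub_tool_values text)

-- ===== LEMMAS AND PROOFS =====

-- B's loop as a structural recursion over the word list (flag-carrying state machine)
def pvSpecB (flag : Bool) : List String → List String
  | [] => []
  | w :: ws =>
    let lw := PySem.Str.lower w
    if pvKeywordsB.contains lw then (lw ++ ": ___") :: pvSpecB true ws
    else if PySem.Str.strIsdigit w then (if flag then pvSpecB false ws else "___" :: pvSpecB false ws)
    else w :: pvSpecB false ws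

lemma pvFoldB_eq (ws : List String) : ∀ (flag : Bool) (acc : List String),
    (ws.foldl pvStepB (flag, acc)).2 = acc ++ pvSpecB flag ws := by
  induction ws with
  | nil => intro flag acc; simp [pvSpecB]
  | cons w ws ih =>
    intro flag acc
    simp only [List.foldl_cons, pvStepB, pvSpecB]
    by_cases hk : PySem.Str.lower w ∈ pvKeywordsB
    · simp [hk, ih]
    · by_cases hd : PySem.Chars.strIsdigit w.toList = true
      · cases flag <;> simp [hk, hd, ih]
      · simp [hk, hd, ih]

-- a string of digits is unchanged by .lower(), hence never a keyword
lemma pvLowerChar_digit (c : Char) (h : PySem.Chars.isdigit c = true) :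
    PySem.Chars.lowerChar c = c := by
  unfold PySem.Chars.isdigit at h
  unfold PySem.Chars.lowerChar PySem.Chars.isupper
  simp only [Bool.and_eq_true, decide_eq_true_eq] at h ⊢
  rw [if_neg]
  rintro ⟨h1, _⟩
  obtain ⟨_, h4⟩ := h
  rw [Char.le_def] at h1 h4
  have := UInt32.le_trans h1 h4
  revert this
  decide

lemma pvLower_digits (s : String) (h : PySem.Chars.strIsdigit s.toList = true) :
    PySem.Str.lower s = s := by
  have hmap : PySem.Chars.lower s.toList = s.toList := by
    unfold PySem.Chars.strIsdigit at h
    simp only [Bool.and_eq_true, List.all_eq_true] at h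
    unfold PySem.Chars.lower
    have : s.toList.map PySem.Chars.lowerChar = s.toList.map id :=
      List.map_congr_left (fun c hc => pvLowerChar_digit c (h.2 c hc))
    simpa using this
  have : (PySem.Str.lower s).toList = s.toList := by
    simpa [PySem.Str.toList_lower] using hmap
  exact String.toList_inj.mp this

lemma pvDigit_not_keyword (s : String) (h : PySem.Chars.strIsdigit s.toList = true) :
    PySem.Str.lower s ∉ pvKeywordsB := by
  rw [pvLower_digits s h]
  intro hm
  have hm' : s ∈ ["household_id", "household", "item_id", "item", "id"] :=
    (PySem.Set.mem_ofList _ _).mp hm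
  simp only [List.mem_cons, List.not_mem_nil, or_false] at hm'
  rcases hm' with h1 | h1 | h1 | h1 | h1 <;> (subst h1; exact absurd h (by decide))

lemma pvKeywords_same : pvKeywordsA = (pvKeywordsB : List String) := by decide

-- the flag only matters when the head is a digit, and then it drops the head
lemma pvSpecB_true_digit (d : String) (ws : List String) (h : PySem.Chars.strIsdigit d.toList = true) :
    pvSpecB true (d :: ws) = pvSpecB false ws := by
  have hk : PySem.Str.lower d ∉ pvKeywordsB := pvDigit_not_keyword d h
  simp [pvSpecB, hk, h]

lemma pvSpecB_true_nondigit (w : String) (ws : List String) (h : ¬ PySem.Chars.strIsdigit w.toList = true) :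
    pvSpecB true (w :: ws) = pvSpecB false (w :: ws) := by
  simp [pvSpecB, h]

lemma pvLoopA_eq (words : List String) : ∀ (i : Nat),
    pvLoopA words i = pvSpecB false (words.drop i) := by
  intro i
  induction hn : words.length - i using Nat.strong_induction_on generalizing i with
  | _ n ih =>
  subst hn
  by_cases h : i < words.length
  · have hdrop : words.drop i = words[i] :: words.drop (i + 1) :=
      (List.drop_eq_getElem_cons h)
    have ih1 : pvLoopA words (i+1) = pvSpecB false (words.drop (i+1)) :=
      ih (words.length - (i+1)) (by omega) (i+1) rfl
    rw [pvLoopA]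
    simp only [h, dif_pos]
    by_cases hk : PySem.Str.lower words[i] ∈ pvKeywordsB
    · have hkA : PySem.Str.lower words[i] ∈ pvKeywordsA := pvKeywords_same ▸ hk
      rw [hdrop]
      by_cases h2 : i + 1 < words.length
      · have hdrop2 : words.drop (i+1) = words[i+1] :: words.drop (i + 2) :=
          (List.drop_eq_getElem_cons h2)
        have ih2 : pvLoopA words (i+2) = pvSpecB false (words.drop (i+2)) :=
          ih (words.length - (i+2)) (by omega) (i+2) rfl
        by_cases hd : PySem.Chars.strIsdigit (words[i+1]).toList = true
        · have hskip : pvSpecB true (words.drop (i+1)) = pvSpecB false (words.drop (i+2)) := by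
            rw [hdrop2]; exact pvSpecB_true_digit _ _ hd
          simp [pvSpecB, h2, hd, hkA, hk, ih2, hskip]
        · have hsame : pvSpecB true (words.drop (i+1)) = pvSpecB false (words.drop (i+1)) := by
            rw [hdrop2, pvSpecB_true_nondigit _ _ hd, ← hdrop2]
          simp [pvSpecB, h2, hd, hkA, hk, ih1, hsame]
      · have hnil : words.drop (i+1) = [] := List.drop_eq_nil_of_le (by omega)
        simp [pvSpecB, h2, hkA, hk, ih1, hnil]
    · have hkA : PySem.Str.lower words[i] ∉ pvKeywordsA := pvKeywords_same ▸ hk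
      rw [hdrop]
      by_cases hd : PySem.Chars.strIsdigit (words[i]).toList = true
      · simp [pvSpecB, hkA, hk, hd, ih1]
      · simp [pvSpecB, hkA, hk, hd, ih1]
  · rw [pvLoopA]
    simp only [h, dif_neg, not_false_iff]
    rw [List.drop_eq_nil_of_le (by omega)]
    simp [pvSpecB]

-- ===== VERDICT (by name: the statement is the Claim_ definition above) =====
theorem scrub_tool_values_spec : Claim_equal_scrub_tool_values := by
  intro text _
  unfold Spec_scrub_tool_values scrub_tool_values scrub_tool_values_alt
  rw [pvFoldB_eq, List.nil_append, pvLoopA_eq, List.drop_zero]
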